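-- pv_equiv track=rewrite | github.com/Benjaminr180/IA25_P2 | Enfoque_2/083_Detección_de_Aristas_y_Segmentación.py | aplicar_sobel
-- ===== SOURCE A (Python) =====
-- imagen = [
--     [255, 255, 255, 255, 255],
--     [255, 0, 0, 0, 255],
--     [255, 0, 255, 0, 255],
--     [255, 0, 0, 0, 255],
--     [255, 255, 255, 255, 255]
-- ]
--
-- def aplicar_sobel(imagen):
--     filas, columnas = len(imagen), len(imagen[0])
--     imagen_sobel = []
--
--     for i in range(1, filas - 1):
--         fila_sobel = []
--         for j in range(1, columnas - 1):
--             # Aplicamos un filtro Sobel simple en una dirección (por ejemplo, horizontal)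
--             gx = imagen[i-1][j+1] + 2*imagen[i][j+1] + imagen[i+1][j+1] - imagen[i-1][j-1] - 2*imagen[i][j-1] - imagen[i+1][j-1]
--             fila_sobel.append(abs(gx))  # Valor absoluto para resaltar los bordes
--         imagen_sobel.append(fila_sobel)
--
--     return imagen_sobel
--
-- imagen_sobel = aplicar_sobel(imagen)
-- ===== SOURCE B (Python) =====
-- def aplicar_sobel(imagen):
--     filas, columnas = len(imagen), len(imagen[0])
--     alto, ancho = filas - 2, columnas - 2
--     acumulador = [[0] * ancho for _ in range(alto)]
--     # Gx kernel as a sparse tap list (row offset, col offset, weight): the result is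
--     # built by accumulating six weighted shifted copies of the image, one tap at a time.
--     taps = [(-1, 1, 1), (0, 1, 2), (1, 1, 1), (-1, -1, -1), (0, -1, -2), (1, -1, -1)]
--     for di, dj, peso in taps:
--         for i in range(alto):
--             fila = imagen[1 + i + di]
--             for j in range(ancho):
--                 acumulador[i][j] += peso * fila[1 + j + dj]
--     return [[abs(v) for v in fila] for fila in acumulador]
-- ===== Notes on version B (the rewrite author's own statement) =====
-- stated objective: alternative
-- what changed: B builds the result by tap-wise accumulation: it allocates a zero table for the interior pixels and, for each of the six (row-offset, col-offset, weight) taps of the Gx kernel, sweeps the whole table adding that weighted shifted copy of the image, taking absolute values at the end — instead of A's per-pixel six-term gather in one nested loop.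
import Mathlib
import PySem

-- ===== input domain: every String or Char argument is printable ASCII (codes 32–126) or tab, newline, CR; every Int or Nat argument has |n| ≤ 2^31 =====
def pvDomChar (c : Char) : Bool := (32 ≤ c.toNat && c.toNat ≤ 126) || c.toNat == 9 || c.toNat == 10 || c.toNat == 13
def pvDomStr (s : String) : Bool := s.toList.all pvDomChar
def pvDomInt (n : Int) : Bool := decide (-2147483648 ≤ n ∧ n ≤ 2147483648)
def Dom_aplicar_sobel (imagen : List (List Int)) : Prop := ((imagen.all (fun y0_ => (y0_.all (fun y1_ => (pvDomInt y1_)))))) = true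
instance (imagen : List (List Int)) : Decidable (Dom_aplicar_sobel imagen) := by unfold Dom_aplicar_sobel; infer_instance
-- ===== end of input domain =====

-- B accumulates six weighted shifted copies of the image (one pass per kernel tap) into a
-- zero-initialised table and takes absolute values at the end, instead of A's per-pixel
-- six-term gather; objective: alternative (same asymptotic cost, different algorithm shape).

-- ===== PORT A =====
def aplicar_sobel (imagen : List (List Int)) : List (List Int) :=
  let filas : Int := (imagen.length : Int)
  let columnas : Int := ((PySem.List.pyGetD imagen 0 []).length : Int)
  (PySem.List.pyRange 1 (filas - 1) 1).map (fun i =>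
    (PySem.List.pyRange 1 (columnas - 1) 1).map (fun j =>
      |(PySem.List.pyGetD (PySem.List.pyGetD imagen (i-1) []) (j+1) 0
        + 2 * PySem.List.pyGetD (PySem.List.pyGetD imagen i []) (j+1) 0
        + PySem.List.pyGetD (PySem.List.pyGetD imagen (i+1) []) (j+1) 0
        - PySem.List.pyGetD (PySem.List.pyGetD imagen (i-1) []) (j-1) 0
        - 2 * PySem.List.pyGetD (PySem.List.pyGetD imagen i []) (j-1) 0
        - PySem.List.pyGetD (PySem.List.pyGetD imagen (i+1) []) (j-1) 0)|))

-- ===== PORT B =====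
-- Source B's tap list: (row offset, col offset, weight) for the Gx kernel
def pvTaps : List (Int × Int × Int) :=
  [(-1, 1, 1), (0, 1, 2), (1, 1, 1), (-1, -1, -1), (0, -1, -2), (1, -1, -1)]

def aplicar_sobel_alt (imagen : List (List Int)) : List (List Int) :=
  let filas : Int := (imagen.length : Int)
  let columnas : Int := ((PySem.List.pyGetD imagen 0 []).length : Int)
  let alto := filas - 2
  let ancho := columnas - 2
  -- the zero table [[0]*ancho for _ in range(alto)]
  let acc0 : List (List Int) := List.replicate alto.toNat (List.replicate ancho.toNat 0)
  -- Source B's 'for di, dj, peso in taps:' pass updating acumulador[i][j] for every i, j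
  -- (the Python index loops touch each cell exactly once, transcribed as mapIdx)
  let acc := pvTaps.foldl (fun acc t =>
    acc.mapIdx (fun i fila_acc =>
      fila_acc.mapIdx (fun j v =>
        v + t.2.2 * PySem.List.pyGetD (PySem.List.pyGetD imagen (1 + (i : Int) + t.1) [])
              (1 + (j : Int) + t.2.1) 0))) acc0
  acc.map (fun fila => fila.map (fun v => |v|))

-- ===== PRECONDITION & SPEC =====
-- Pre_ excludes exactly the inputs on which Python A raises (IndexError): the empty image
-- (len(imagen[0])), and images with ≥3 rows and ≥3 columns containing a row shorter than
-- len(imagen[0]) (the convolution indexes every row up to column len(imagen[0])-1).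
def Pre_aplicar_sobel (imagen : List (List Int)) : Prop :=
  imagen ≠ [] ∧
    (imagen.length ≤ 2 ∨ (imagen.headI).length ≤ 2 ∨
      ∀ fila ∈ imagen, (imagen.headI).length ≤ fila.length)
instance (imagen : List (List Int)) : Decidable (Pre_aplicar_sobel imagen) := by
  unfold Pre_aplicar_sobel; infer_instance

def pvWitness_aplicar_sobel : List (List Int) := [[2, 0, 5], [1, 9, 1], [7, 3, 0]]

def Spec_aplicar_sobel (imagen : List (List Int)) (out : List (List Int)) : Prop := out = aplicar_sobel_alt imagen
instance (imagen : List (List Int)) (out : List (List Int)) : Decidable (Spec_aplicar_sobel imagen out) := by unfold Spec_aplicar_sobel; infer_instance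

-- ===== CLAIM (what is proved, stated in full; the proofs are below) =====
def Claim_equal_aplicar_sobel : Prop := ∀ (imagen : List (List Int)), Dom_aplicar_sobel imagen → Pre_aplicar_sobel imagen → Spec_aplicar_sobel imagen (aplicar_sobel imagen)

-- ===== LEMMAS AND PROOFS =====

-- the two ports agree on every input (Pre_ is only about where the Pythons raise)
theorem pv_ports_eq (imagen : List (List Int)) :
    aplicar_sobel imagen = aplicar_sobel_alt imagen := by
  unfold aplicar_sobel aplicar_sobel_alt pvTaps
  simp only [List.foldl]
  apply List.ext_getElem
  · simp [PySem.List.length_pyRange_one]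
    omega
  · intro i h1 h2
    simp only [List.getElem_map, List.getElem_mapIdx, List.getElem_replicate,
      PySem.List.getElem_pyRange_one]
    apply List.ext_getElem
    · simp [PySem.List.length_pyRange_one]
      omega
    · intro j hj1 hj2
      simp only [List.getElem_map, List.getElem_mapIdx, List.getElem_replicate,
        PySem.List.getElem_pyRange_one]
      congr 1
      ring_nf

-- ===== VERDICT (by name: the statement is the Claim_ definition above) =====
theorem aplicar_sobel_spec : Claim_equal_aplicar_sobel := by
  intro imagen _ _
  exact pv_ports_eq imagen
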